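-- pv_equiv track=rewrite | github.com/JialiLiuu/2025FALL | project2/pareto_optimal.py | staircase_dc_optimized
-- ===== SOURCE A (Python) =====
-- def staircase_dc_optimized(points):
--     """
--     Computes Pareto-optimal points in O(n log n) time
--     using divide and conquer approach
--     """
--     if not points:
--         return []
--
--     # Sort points by x-coordinate in ascending order
--     points_sorted = sorted(points, key=lambda p: p[0])
--
--     def recursive_helper(point_subset):
--         """
--         Recursively compute Pareto-optimal points for a subset
--         """
--         # Base case: single point is always Pareto-optimal
--         if len(point_subset) == 1:
--             return point_subset
--
--         # Divide: split into left and right halves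
--         mid_index = len(point_subset) // 2
--         left_half = point_subset[:mid_index]
--         right_half = point_subset[mid_index:]
--
--         # Conquer: recursively solve subproblems
--         left_staircase = recursive_helper(left_half)
--         right_staircase = recursive_helper(right_half)
--
--         # Combine: merge the two staircases
--         return merge_staircases(left_staircase, right_staircase)
--
--     def merge_staircases(left_points, right_points):
--         """
--         Merge left and right Pareto-optimal sets
--         """
--         # Find maximum y-coordinate in right staircase
--         max_y_right = max(point[1] for point in right_points)
--
--         # Filter left points: keep only those not dominated by right points
--         filtered_left = []
--         for left_point in left_points:
--             # A left point is dominated if its y <= max_y_right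
--             # (since all right points have x >= any left point due to sorting)
--             if left_point[1] > max_y_right:
--                 filtered_left.append(left_point)
--
--         # Combine filtered left with all right points
--         return filtered_left + right_points
--
--     # Compute the staircase recursively
--     staircase = recursive_helper(points_sorted)
--
--     return staircase
-- ===== SOURCE B (Python) =====
-- def staircase_dc_optimized(points):
--     """Pareto-optimal points by one backward scan over the x-sorted list."""
--     pts = sorted(points, key=lambda p: p[0])
--     res = []
--     best = None
--     for p in reversed(pts):
--         if best is None or p[1] > best:
--             res.append(p)
--             best = p[1]
--     res.reverse()
--     return res
-- ===== Notes on version B (the rewrite author's own statement) =====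
-- stated objective: simpler
-- what changed: Replaces the recursive divide-and-conquer split/merge with a single backward scan over the x-sorted list that keeps a point iff its y exceeds the running suffix maximum.
import Mathlib
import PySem

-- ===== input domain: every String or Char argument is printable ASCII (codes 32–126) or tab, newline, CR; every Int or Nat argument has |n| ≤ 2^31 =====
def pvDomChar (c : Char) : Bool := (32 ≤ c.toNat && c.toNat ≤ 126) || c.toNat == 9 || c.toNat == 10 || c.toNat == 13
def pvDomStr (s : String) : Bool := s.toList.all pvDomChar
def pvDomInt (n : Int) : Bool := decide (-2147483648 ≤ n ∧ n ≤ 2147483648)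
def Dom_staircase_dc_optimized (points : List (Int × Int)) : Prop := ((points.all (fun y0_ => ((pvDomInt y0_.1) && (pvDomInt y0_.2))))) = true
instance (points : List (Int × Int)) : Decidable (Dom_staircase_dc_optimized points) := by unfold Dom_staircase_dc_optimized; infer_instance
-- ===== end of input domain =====

-- B replaces A's divide-and-conquer split/merge with one backward suffix-max scan (objective: simpler).

-- ===== PORT A =====

-- merge_staircases: Python's max(...) raises on an empty right side; in A the right side is
-- always nonempty, so `.getD 0` is only a totality default for an unreachable case.
def pyMergeStaircases (left_points right_points : List (Int × Int)) : List (Int × Int) :=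
  let max_y_right := (PySem.List.max? (right_points.map Prod.snd) (fun y => y)).getD 0
  (left_points.foldl (fun acc p => if max_y_right < p.2 then acc ++ [p] else acc)
      ([] : List (Int × Int))) ++ right_points

-- recursive_helper: Python's base case is length 1; length 0 never occurs (the top level
-- returns [] for empty input), so the `≤ 1` test is only a totality guard there.
def pyRecursiveHelper (point_subset : List (Int × Int)) : List (Int × Int) :=
  if h : point_subset.length ≤ 1 then point_subset
  else
    let mid := point_subset.length / 2
    pyMergeStaircases (pyRecursiveHelper (point_subset.take mid))
      (pyRecursiveHelper (point_subset.drop mid))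
termination_by point_subset.length
decreasing_by
  · simp only [List.length_take]; omega
  · simp only [List.length_drop]; omega

def staircase_dc_optimized (points : List (Int × Int)) : List (Int × Int) :=
  if points = [] then []
  else pyRecursiveHelper (PySem.List.sorted points (fun p => p.1))

-- ===== PORT B =====

def staircase_dc_optimized_alt (points : List (Int × Int)) : List (Int × Int) :=
  let pts := PySem.List.sorted points (fun p => p.1)
  let st := pts.reverse.foldl
    (fun (st : List (Int × Int) × Option Int) p =>
      match st.2 with
      | none => (st.1 ++ [p], some p.2)
      | some b => if b < p.2 then (st.1 ++ [p], some p.2) else (st.1, some b))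
    (([] : List (Int × Int)), (none : Option Int))
  st.1.reverse

-- ===== PRECONDITION & SPEC =====
def Spec_staircase_dc_optimized (points : List (Int × Int)) (out : List (Int × Int)) : Prop := out = staircase_dc_optimized_alt points
instance (points : List (Int × Int)) (out : List (Int × Int)) : Decidable (Spec_staircase_dc_optimized points out) := by unfold Spec_staircase_dc_optimized; infer_instance

-- ===== CLAIM (what is proved, stated in full; the proofs are below) =====
def Claim_equal_staircase_dc_optimized : Prop := ∀ (points : List (Int × Int)), Dom_staircase_dc_optimized points → Spec_staircase_dc_optimized points (staircase_dc_optimized points)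

-- ===== LEMMAS AND PROOFS =====

-- Proof-side model of B's scan, processing the list back-to-front by structural foldr.
def pvStep (p : Int × Int) (st : List (Int × Int) × Option Int) : List (Int × Int) × Option Int :=
  match st.2 with
  | none => (p :: st.1, some p.2)
  | some b => if b < p.2 then (p :: st.1, some p.2) else (st.1, some b)

def pvScan (l : List (Int × Int)) : List (Int × Int) × Option Int :=
  l.foldr pvStep ([], none)

theorem pvStep_some (p : Int × Int) (l : List (Int × Int)) (b : Int) :
    pvStep p (l, some b) = if b < p.2 then (p :: l, some p.2) else (l, some b) := rfl

theorem pvStep_eq (p : Int × Int) (st : List (Int × Int) × Option Int) (b : Int)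
    (h : st.2 = some b) :
    pvStep p st = if b < p.2 then (p :: st.1, some p.2) else (st.1, some b) := by
  obtain ⟨l, o⟩ := st
  cases o <;> simp_all [pvStep]

theorem pv_foldl_max_init (l : List Int) (a b : Int) :
    l.foldl max (max a b) = max a (l.foldl max b) := by
  induction l generalizing b with
  | nil => rfl
  | cons c t ih =>
    simp only [List.foldl_cons]
    rw [max_assoc, ih]

-- second component of the scan = running maximum of the y's
theorem pvScan_snd (l : List (Int × Int)) (p : Int × Int) :
    (pvScan (p :: l)).2 = some ((l.map Prod.snd).foldl max p.2) := by
  induction l generalizing p with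
  | nil => rfl
  | cons q t ih =>
    rw [show pvScan (p :: q :: t) = pvStep p (pvScan (q :: t)) from rfl,
        pvStep_eq p (pvScan (q :: t)) _ (ih q)]
    have hm : ((q :: t).map Prod.snd).foldl max p.2
        = max p.2 ((t.map Prod.snd).foldl max q.2) := by
      simp only [List.map_cons, List.foldl_cons]
      exact pv_foldl_max_init _ _ _
    rw [hm]
    split_ifs with hb <;> simp only [Option.some.injEq] <;> omega

-- the kept list is nonempty and preserves the running maximum of the y's
theorem pvScan_fst_max (l : List (Int × Int)) (p : Int × Int) :
    ∃ q t, (pvScan (p :: l)).1 = q :: t ∧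
      (t.map Prod.snd).foldl max q.2 = (l.map Prod.snd).foldl max p.2 := by
  induction l generalizing p with
  | nil => exact ⟨p, [], rfl, rfl⟩
  | cons r t' ih =>
    obtain ⟨q, t, h1, h2⟩ := ih r
    have hfm : ((r :: t').map Prod.snd).foldl max p.2
        = max p.2 ((t'.map Prod.snd).foldl max r.2) := by
      simp only [List.map_cons, List.foldl_cons]
      exact pv_foldl_max_init _ _ _
    rw [show pvScan (p :: r :: t') = pvStep p (pvScan (r :: t')) from rfl,
        pvStep_eq p (pvScan (r :: t')) _ (pvScan_snd t' r)]
    split_ifs with hb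
    · refine ⟨p, (pvScan (r :: t')).1, rfl, ?_⟩
      rw [h1]
      simp only [List.map_cons, List.foldl_cons]
      rw [pv_foldl_max_init, h2, pv_foldl_max_init]
    · refine ⟨q, t, h1, ?_⟩
      rw [h2, hfm]
      omega

-- seeding the scan with a known best b filters the unseeded result by y > b
theorem pvScan_seeded (l : List (Int × Int)) (rs : List (Int × Int)) (b : Int) :
    l.foldr pvStep (rs, some b)
      = ((pvScan l).1.filter (fun q => decide (b < q.2)) ++ rs,
         some ((l.map Prod.snd).foldl max b)) := by
  induction l with
  | nil => rfl
  | cons p t ih =>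
    rw [List.foldr_cons, ih, pvStep_some]
    cases t with
    | nil =>
      by_cases hbp : b < p.2 <;>
        simp [pvScan, pvStep, List.filter, hbp] <;> omega
    | cons r t' =>
      obtain ⟨M, hM⟩ : ∃ M, (t'.map Prod.snd).foldl max r.2 = M := ⟨_, rfl⟩
      have hsnd : (pvScan (r :: t')).2 = some M := by rw [pvScan_snd t' r, hM]
      have hMb : ((r :: t').map Prod.snd).foldl max b = max b M := by
        simp only [List.map_cons, List.foldl_cons]
        rw [pv_foldl_max_init, hM]
      have hPb : ((p :: r :: t').map Prod.snd).foldl max b = max b (max p.2 M) := by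
        simp only [List.map_cons, List.foldl_cons]
        have e1 : max (max b p.2) r.2 = max p.2 (max b r.2) := by omega
        rw [e1, pv_foldl_max_init, pv_foldl_max_init, hM]
        omega
      rw [hMb, hPb]
      by_cases h1 : max b M < p.2
      · have h2 : M < p.2 := by omega
        have h3 : b < p.2 := by omega
        have hfst : (pvScan (p :: r :: t')).1 = p :: (pvScan (r :: t')).1 := by
          rw [show pvScan (p :: r :: t') = pvStep p (pvScan (r :: t')) from rfl,
              pvStep_eq p (pvScan (r :: t')) M hsnd, if_pos h2]
        rw [if_pos h1, hfst, List.filter_cons]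
        simp only [h3, decide_true, if_true, List.cons_append, Prod.mk.injEq]
        exact ⟨by trivial, by rw [max_eq_left h2.le, max_eq_right h3.le]⟩
      · rw [if_neg h1]
        by_cases h2 : M < p.2
        · have h3 : ¬ b < p.2 := by omega
          have hfst : (pvScan (p :: r :: t')).1 = p :: (pvScan (r :: t')).1 := by
            rw [show pvScan (p :: r :: t') = pvStep p (pvScan (r :: t')) from rfl,
                pvStep_eq p (pvScan (r :: t')) M hsnd, if_pos h2]
          rw [hfst, List.filter_cons]
          simp only [h3, decide_false, Prod.mk.injEq]
          exact ⟨by trivial, by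
            rw [max_eq_left h2.le, max_eq_left (not_lt.mp h3),
                max_eq_left (le_of_lt (lt_of_lt_of_le h2 (not_lt.mp h3)))]⟩
        · have hfst : (pvScan (p :: r :: t')).1 = (pvScan (r :: t')).1 := by
            rw [show pvScan (p :: r :: t') = pvStep p (pvScan (r :: t')) from rfl,
                pvStep_eq p (pvScan (r :: t')) M hsnd, if_neg h2]
          rw [hfst]
          simp only [Prod.mk.injEq]
          exact ⟨by trivial, by rw [max_eq_right (not_lt.mp h2)]⟩

-- A's recursion computes exactly the backward suffix-max scan
theorem pvRec_eq_scan (l : List (Int × Int)) (h : l ≠ []) :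
    pyRecursiveHelper l = (pvScan l).1 := by
  rw [pyRecursiveHelper]
  by_cases h1 : l.length ≤ 1
  · rw [dif_pos h1]
    match l, h with
    | [p], _ => rfl
    | p :: q :: t, _ => simp at h1
  · rw [dif_neg h1]
    show pyMergeStaircases (pyRecursiveHelper (l.take (l.length / 2)))
        (pyRecursiveHelper (l.drop (l.length / 2))) = (pvScan l).1
    have htake : l.take (l.length / 2) ≠ [] := by
      intro hc
      have := congrArg List.length hc
      simp only [List.length_take, List.length_nil] at this
      omega
    have hdrop : l.drop (l.length / 2) ≠ [] := by
      intro hc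
      have := congrArg List.length hc
      simp only [List.length_drop, List.length_nil] at this
      omega
    rw [pvRec_eq_scan (l.take (l.length / 2)) htake,
        pvRec_eq_scan (l.drop (l.length / 2)) hdrop]
    obtain ⟨p, t, hr⟩ := List.exists_cons_of_ne_nil hdrop
    obtain ⟨q, tq, hq1, hq2⟩ := pvScan_fst_max t p
    set M := ((t.map Prod.snd).foldl max p.2) with hMdef
    have hmax : (PySem.List.max? (((pvScan (l.drop (l.length / 2))).1).map Prod.snd)
        (fun y => y)).getD 0 = M := by
      rw [hr, hq1]
      simp only [List.map_cons]
      rw [PySem.List.max?_id_cons]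
      simp [hq2]
    rw [pyMergeStaircases]
    simp only [hmax]
    rw [PySem.List.foldl_append_ite_eq_filter]
    have hsplit : pvScan l
        = (l.take (l.length / 2)).foldr pvStep (pvScan (l.drop (l.length / 2))) := by
      conv_lhs => rw [← List.take_append_drop (l.length / 2) l]
      rw [pvScan, List.foldr_append]
      rfl
    have hsnd : (pvScan (l.drop (l.length / 2))).2 = some M := by
      rw [hr, pvScan_snd]
    have hpair : pvScan (l.drop (l.length / 2))
        = ((pvScan (l.drop (l.length / 2))).1, some M) := by
      rw [← hsnd]
    rw [hsplit, hpair, pvScan_seeded]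
    rfl
termination_by l.length
decreasing_by
  · simp only [List.length_take]; omega
  · simp only [List.length_drop]; omega

-- B's port (reversed foldl with append) computes the scan, reversed
theorem pvAlt_fold_eq_scan (l : List (Int × Int)) :
    l.reverse.foldl
      (fun (st : List (Int × Int) × Option Int) p =>
        match st.2 with
        | none => (st.1 ++ [p], some p.2)
        | some b => if b < p.2 then (st.1 ++ [p], some p.2) else (st.1, some b))
      (([] : List (Int × Int)), (none : Option Int))
      = ((pvScan l).1.reverse, (pvScan l).2) := by
  induction l with
  | nil => rfl
  | cons p t ih =>
    simp only [List.reverse_cons, List.foldl_append, List.foldl_cons, List.foldl_nil, ih]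
    rw [show pvScan (p :: t) = pvStep p (pvScan t) from rfl, pvStep]
    cases hs : (pvScan t).2 with
    | none => simp
    | some b =>
      by_cases hb : b < p.2
      · simp [hb]
      · simp [hb]

theorem pvAlt_eq_scan (points : List (Int × Int)) :
    staircase_dc_optimized_alt points
      = (pvScan (PySem.List.sorted points (fun p => p.1))).1 := by
  rw [staircase_dc_optimized_alt]
  simp only [pvAlt_fold_eq_scan, List.reverse_reverse]

-- ===== VERDICT (by name: the statement is the Claim_ definition above) =====
theorem staircase_dc_optimized_spec : Claim_equal_staircase_dc_optimized := by
  intro points _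
  unfold Spec_staircase_dc_optimized
  rw [staircase_dc_optimized, pvAlt_eq_scan]
  by_cases hnil : points = []
  · subst hnil
    rw [if_pos rfl]
    rfl
  · rw [if_neg hnil]
    have hs : PySem.List.sorted points (fun p => p.1) ≠ [] := by
      rw [Ne, PySem.List.sorted_eq_nil_iff]
      exact hnil
    exact pvRec_eq_scan _ hs
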